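-- pv_equiv track=rewrite | github.com/ricardoantonio/advent-of-code | 2023/day02/part2.py | calculate_set_power
-- ===== SOURCE A (Python) =====
-- def calculate_set_power(sets):
--     minimum_required = {}
--     for game_set in sets:
--         for color, quantity in game_set.items():
--             minimum_required[color] = max(quantity, minimum_required.get(color, 0))
--
--     power = 1
--     for color in minimum_required:
--         power *= minimum_required[color]
--
--     return power
-- ===== SOURCE B (Python) =====
-- def calculate_set_power(sets):
--     colors = set()
--     for game_set in sets:
--         colors.update(game_set.keys())
--     power = 1
--     for color in colors:
--         best = 0
--         for game_set in sets:
--             best = max(best, game_set.get(color, 0))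
--         power *= best
--     return power
-- ===== Notes on version B (the rewrite author's own statement) =====
-- stated objective: alternative
-- what changed: Instead of building a running-max dict in one pass over all pairs, B first collects the set of colors and then computes each color's maximum by rescanning every game set with get(color, 0), multiplying the maxima.
import Mathlib
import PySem

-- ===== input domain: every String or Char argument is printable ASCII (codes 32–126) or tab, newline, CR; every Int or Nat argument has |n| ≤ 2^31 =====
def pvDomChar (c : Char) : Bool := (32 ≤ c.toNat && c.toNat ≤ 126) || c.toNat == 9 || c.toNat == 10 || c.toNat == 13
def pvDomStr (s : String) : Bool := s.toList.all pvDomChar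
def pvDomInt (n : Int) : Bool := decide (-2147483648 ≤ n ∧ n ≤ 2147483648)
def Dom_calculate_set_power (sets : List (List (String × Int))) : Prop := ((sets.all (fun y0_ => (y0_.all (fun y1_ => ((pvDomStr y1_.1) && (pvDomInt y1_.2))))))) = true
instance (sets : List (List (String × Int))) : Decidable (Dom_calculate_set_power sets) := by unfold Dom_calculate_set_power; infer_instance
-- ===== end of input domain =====

-- B replaces A's single index-building pass (a running-max dict) with collecting the color set first
-- and then rescanning all game sets once per color; objective: alternative decomposition, same result.

-- ===== PORT A =====
-- each game_set is a Python dict, modelled as PySem.Dict.ofList of its pair list;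
-- 'minimum_required[color]' for color drawn from the dict's own keys never raises, ported as getD _ 0 (exact here)
def calculate_set_power (sets : List (List (String × Int))) : Int :=
  let minimum_required :=
    sets.foldl (fun d g =>
      (PySem.Dict.ofList g).items.foldl
        (fun d p => d.insert p.1 (max p.2 (d.getD p.1 0))) d)
      PySem.Dict.empty
  minimum_required.keys.foldl (fun power color => power * minimum_required.getD color 0) 1

-- ===== PORT B =====
def calculate_set_power_alt (sets : List (List (String × Int))) : Int :=
  let colors : PySem.Set String :=
    sets.foldl (fun s g => PySem.Set.update s (PySem.Dict.ofList g).keys) PySem.Set.empty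
  colors.foldl (fun power color =>
    power * sets.foldl (fun best g => max best ((PySem.Dict.ofList g).getD color 0)) 0) 1

-- ===== PRECONDITION & SPEC =====
def Spec_calculate_set_power (sets : List (List (String × Int))) (out : Int) : Prop := out = calculate_set_power_alt sets
instance (sets : List (List (String × Int))) (out : Int) : Decidable (Spec_calculate_set_power sets out) := by unfold Spec_calculate_set_power; infer_instance

-- ===== CLAIM (what is proved, stated in full; the proofs are below) =====
def Claim_equal_calculate_set_power : Prop := ∀ (sets : List (List (String × Int))), Dom_calculate_set_power sets → Spec_calculate_set_power sets (calculate_set_power sets)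

-- ===== LEMMAS AND PROOFS =====

-- lookup-with-default-0 in a literal dict whose key is absent
theorem pv_getD_mk_not_mem (c : String) :
    ∀ (l : List (String × Int)), c ∉ l.map Prod.fst → (PySem.Dict.mk l).getD c 0 = 0 := by
  intro l
  induction l with
  | nil => intro _; rfl
  | cons p t ih =>
      obtain ⟨k, v⟩ := p
      intro h
      simp only [List.map_cons, List.mem_cons] at h
      rw [PySem.Dict.getD_eq_get?_getD, PySem.Dict.get?_mk_cons]
      have hne : (k == c) = false := by simpa using fun hc => h (Or.inl hc.symm)
      rw [hne]
      simp only [if_neg Bool.false_ne_true]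
      exact (PySem.Dict.getD_eq_get?_getD _ _ _).symm.trans (ih (fun hc => h (Or.inr hc)))

-- one game_set's pass over A's dict: every stored value stays ≥ 0 and the lookup of c becomes
-- the max of the old value with this game_set's value of c
theorem pv_inner (c : String) :
    ∀ (l : List (String × Int)) (d : PySem.Dict String Int),
      (l.map Prod.fst).Nodup → (∀ x, 0 ≤ d.getD x 0) →
      ((l.foldl (fun d p => d.insert p.1 (max p.2 (d.getD p.1 0))) d).getD c 0
          = max (d.getD c 0) ((PySem.Dict.mk l).getD c 0))
      ∧ (∀ x, 0 ≤ (l.foldl (fun d p => d.insert p.1 (max p.2 (d.getD p.1 0))) d).getD x 0) := by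
  intro l
  induction l with
  | nil =>
      intro d _ hd
      exact ⟨by simpa [PySem.Dict.getD_eq_get?_getD] using (max_eq_left (hd c)).symm, hd⟩
  | cons p t ih =>
      obtain ⟨k, v⟩ := p
      intro d hn hd
      simp only [List.map_cons, List.nodup_cons] at hn
      have hd' : ∀ x, 0 ≤ (d.insert k (max v (d.getD k 0))).getD x 0 := by
        intro x
        rw [PySem.Dict.getD_insert]
        split_ifs with h
        · exact le_max_of_le_right (hd k)
        · exact hd x
      obtain ⟨heq, hnn⟩ := ih (d.insert k (max v (d.getD k 0))) hn.2 hd'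
      refine ⟨?_, by simpa using hnn⟩
      simp only [List.foldl_cons]
      rw [heq, PySem.Dict.getD_insert]
      have hmk : (PySem.Dict.mk ((k, v) :: t)).getD c 0
          = if k = c then v else (PySem.Dict.mk t).getD c 0 := by
        rw [PySem.Dict.getD_eq_get?_getD, PySem.Dict.get?_mk_cons]
        by_cases h : k = c
        · simp [h]
        · simp [h, PySem.Dict.getD_eq_get?_getD]
      rw [hmk]
      by_cases h : c = k
      · subst h
        have ht : (PySem.Dict.mk t).getD c 0 = 0 := pv_getD_mk_not_mem c t hn.1
        rw [if_pos rfl, if_pos rfl, ht]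
        have := hd c
        omega
      · have h2 : ¬ k = c := fun hc => h hc.symm
        rw [if_neg h, if_neg h2]

-- A's whole build: the final lookup of c is exactly B's running max over the game sets
theorem pv_outer (c : String) :
    ∀ (sets : List (List (String × Int))) (d : PySem.Dict String Int),
      (∀ x, 0 ≤ d.getD x 0) →
      ((sets.foldl (fun d g =>
          (PySem.Dict.ofList g).items.foldl
            (fun d p => d.insert p.1 (max p.2 (d.getD p.1 0))) d) d).getD c 0
        = sets.foldl (fun best g => max best ((PySem.Dict.ofList g).getD c 0)) (d.getD c 0))
      ∧ (∀ x, 0 ≤ (sets.foldl (fun d g =>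
          (PySem.Dict.ofList g).items.foldl
            (fun d p => d.insert p.1 (max p.2 (d.getD p.1 0))) d) d).getD x 0) := by
  intro sets
  induction sets with
  | nil => intro d hd; exact ⟨rfl, hd⟩
  | cons g t ih =>
      intro d hd
      have hnodup : ((PySem.Dict.ofList g).items.map Prod.fst).Nodup :=
        PySem.Dict.nodup_keys_ofList g
      obtain ⟨heq, hnn⟩ := pv_inner c (PySem.Dict.ofList g).items d hnodup hd
      obtain ⟨heq', hnn'⟩ := ih _ hnn
      refine ⟨?_, by simpa using hnn'⟩
      simp only [List.foldl_cons]
      rw [heq', heq]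

-- A's key list equals B's color set, as lists
theorem pv_keys :
    ∀ (sets : List (List (String × Int))) (d : PySem.Dict String Int),
      (sets.foldl (fun d g =>
          (PySem.Dict.ofList g).items.foldl
            (fun d p => d.insert p.1 (max p.2 (d.getD p.1 0))) d) d).keys
        = sets.foldl (fun s g => PySem.Set.update s (PySem.Dict.ofList g).keys) d.keys := by
  intro sets
  induction sets with
  | nil => intro d; rfl
  | cons g t ih =>
      intro d
      simp only [List.foldl_cons]
      rw [ih]
      rw [PySem.Dict.keys_foldl_insert_key (PySem.Dict.ofList g).items Prod.fst
        (fun d p => max p.2 (d.getD p.1 0)) d]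
      rfl

-- ===== VERDICT (by name: the statement is the Claim_ definition above) =====
theorem calculate_set_power_spec : Claim_equal_calculate_set_power := by
  intro sets _
  simp only [Spec_calculate_set_power, calculate_set_power, calculate_set_power_alt]
  have hempty : ∀ x, (0:Int) ≤ (PySem.Dict.empty : PySem.Dict String Int).getD x 0 := by
    intro x; simp [PySem.Dict.getD_empty]
  rw [pv_keys sets PySem.Dict.empty]
  have hkeys : (PySem.Dict.empty : PySem.Dict String Int).keys = PySem.Set.empty := rfl
  rw [hkeys]
  apply PySem.List.foldl_congr_mem
  intro acc c _
  congr 1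
  have := (pv_outer c sets PySem.Dict.empty hempty).1
  simpa [PySem.Dict.getD_empty] using this
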